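-- pv_equiv track=rewrite | github.com/MrBrantCode/unitest_baseline | mut_generate/mist_train_cf/cf_13235/solution.py | longest_common_start
-- ===== SOURCE A (Python) =====
-- def longest_common_start(list1, list2):
--     longest_substring = ""
--     for word1 in list1:
--         for word2 in list2:
--             for i in range(len(word1)):
--                 for j in range(len(word2)):
--                     if word1[i] == word2[j]:
--                         substring = ""
--                         k = 0
--                         while (i+k) < len(word1) and (j+k) < len(word2) and word1[i+k] == word2[j+k]:
--                             substring += word1[i+k]
--                             k += 1
--                         if len(substring) >= 3 and len(substring) > len(longest_substring):
--                             longest_substring = substring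
--     return longest_substring
-- ===== SOURCE B (Python) =====
-- def longest_common_start(list1, list2):
--     best = ""
--     for w1 in list1:
--         for w2 in list2:
--             n, m = len(w1), len(w2)
--             ml = n if n < m else m
--             if ml < 3 or ml <= len(best):
--                 continue  # no common substring of this pair can be >= 3 and longer than best
--             # suffix-LCP DP: rows[i][j] = length of common prefix of w1[i:] and w2[j:]
--             nxt = [0] * (m + 1)
--             rows = []
--             for i in range(n - 1, -1, -1):
--                 cur = [0] * (m + 1)
--                 for j in range(m - 1, -1, -1):
--                     if w1[i] == w2[j]:
--                         cur[j] = nxt[j + 1] + 1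
--                 rows.append(cur)
--                 nxt = cur
--             rows.reverse()
--             # scan in the same i,j order as A; keep the first strictly longer match
--             for i in range(n):
--                 for j in range(m):
--                     l = rows[i][j]
--                     if l >= 3 and l > len(best):
--                         best = w1[i:i + l]
--     return best
-- ===== Notes on version B (the rewrite author's own statement) =====
-- stated objective: faster
-- what changed: Replaces the per-cell while-loop re-extension of matches with, per word pair, a skip when min(len(w1),len(w2)) cannot beat the current best, and otherwise a suffix-LCP dynamic-programming table (rows[i][j] = common-prefix length of w1[i:] and w2[j:]) filled bottom-up and scanned in the same i,j order keeping the first strictly longer match of length >= 3.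
import Mathlib
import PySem

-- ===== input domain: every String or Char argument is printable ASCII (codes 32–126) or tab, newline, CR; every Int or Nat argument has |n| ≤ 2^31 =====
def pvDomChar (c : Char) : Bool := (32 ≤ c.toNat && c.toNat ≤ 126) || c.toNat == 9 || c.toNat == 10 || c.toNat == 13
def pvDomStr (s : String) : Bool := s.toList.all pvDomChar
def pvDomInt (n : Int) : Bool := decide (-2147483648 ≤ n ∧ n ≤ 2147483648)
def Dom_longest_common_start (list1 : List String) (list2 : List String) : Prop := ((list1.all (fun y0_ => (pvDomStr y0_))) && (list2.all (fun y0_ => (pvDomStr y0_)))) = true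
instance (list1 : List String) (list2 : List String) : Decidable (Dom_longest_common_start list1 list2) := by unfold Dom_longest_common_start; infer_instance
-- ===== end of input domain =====

-- B replaces A's per-match while-loop re-extension (O(L^3) per word pair) with a
-- suffix-LCP DP table scanned in the same i,j order (O(L^2) per pair); same result.

-- ===== PORT A =====
-- the while-loop of A: extend the match at (i+k, j+k), accumulating chars into acc
def extA (w1 w2 : List Char) (i j k : Nat) (acc : List Char) : List Char :=
  if _h : i + k < w1.length ∧ j + k < w2.length ∧ w1.getD (i + k) ' ' = w2.getD (j + k) ' ' then
    extA w1 w2 i j (k + 1) (acc ++ [w1.getD (i + k) ' '])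
  else acc
termination_by w1.length - (i + k)
decreasing_by omega

def longest_common_start (list1 : List String) (list2 : List String) : String :=
  String.ofList <| list1.foldl (fun best s1 =>
    list2.foldl (fun best s2 =>
      let w1 := s1.toList
      let w2 := s2.toList
      (List.range w1.length).foldl (fun best i =>
        (List.range w2.length).foldl (fun best j =>
          if w1.getD i ' ' = w2.getD j ' ' then
            let substring := extA w1 w2 i j 0 []
            if 3 ≤ substring.length ∧ best.length < substring.length then substring else best
          else best) best) best) best) []

-- ===== PORT B =====
-- one DP row: (lcpRow c w2 nxt)[j] = (if c = w2[j] then nxt[j+1]+1 else 0), trailing 0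
def lcpRow (c : Char) (w2 : List Char) (nxt : List Nat) : List Nat :=
  match w2 with
  | [] => [0]
  | b :: bs => (if c = b then nxt.tail.headD 0 + 1 else 0) :: lcpRow c bs nxt.tail

-- the DP table, built bottom row first (python builds it reversed then reverses)
def lcpRows (w1 w2 : List Char) : List (List Nat) :=
  match w1 with
  | [] => []
  | a :: as =>
    let rest := lcpRows as w2
    lcpRow a w2 (rest.headD (List.replicate (w2.length + 1) 0)) :: rest

def longest_common_start_alt (list1 : List String) (list2 : List String) : String :=
  String.ofList <| list1.foldl (fun best s1 =>
    list2.foldl (fun best s2 =>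
      let w1 := s1.toList
      let w2 := s2.toList
      let ml := min w1.length w2.length
      if ml < 3 ∨ ml ≤ best.length then best else
      let rows := lcpRows w1 w2
      (List.range w1.length).foldl (fun best i =>
        (List.range w2.length).foldl (fun best j =>
          let l := (rows.getD i []).getD j 0
          if 3 ≤ l ∧ best.length < l then (w1.drop i).take l else best) best) best) best) []

-- ===== PRECONDITION & SPEC =====
def Spec_longest_common_start (list1 : List String) (list2 : List String) (out : String) : Prop := out = longest_common_start_alt list1 list2
instance (list1 : List String) (list2 : List String) (out : String) : Decidable (Spec_longest_common_start list1 list2 out) := by unfold Spec_longest_common_start; infer_instance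

-- ===== CLAIM (what is proved, stated in full; the proofs are below) =====
def Claim_equal_longest_common_start : Prop := ∀ (list1 : List String) (list2 : List String), Dom_longest_common_start list1 list2 → Spec_longest_common_start list1 list2 (longest_common_start list1 list2)

-- ===== LEMMAS AND PROOFS =====

-- specification of both: the common extension (longest common prefix) of two suffixes
def cext : List Char → List Char → List Char
  | a :: as, b :: bs => if a = b then a :: cext as bs else []
  | _, _ => []

theorem cext_nil_right (xs : List Char) : cext xs [] = [] := by
  cases xs <;> simp [cext]

theorem cext_take : ∀ xs ys : List Char, cext xs ys = xs.take (cext xs ys).length := by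
  intro xs ys
  induction xs generalizing ys with
  | nil => simp [cext]
  | cons a as ih =>
    cases ys with
    | nil => simp [cext]
    | cons b bs =>
      by_cases h : a = b
      · simp [cext, h, ← ih bs]
      · simp [cext, h]

-- A's while-loop computes acc ++ cext of the two suffixes
theorem extA_eq : ∀ (w1 w2 : List Char) (i j k : Nat) (acc : List Char),
    extA w1 w2 i j k acc = acc ++ cext (w1.drop (i + k)) (w2.drop (j + k)) := by
  intro w1 w2 i j k acc
  fun_induction extA w1 w2 i j k acc with
  | case1 k acc h ih =>
    obtain ⟨h1, h2, h3⟩ := h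
    rw [List.getD_eq_getElem w1 ' ' h1, List.getD_eq_getElem w2 ' ' h2] at h3
    have e1 : i + (k + 1) = (i + k) + 1 := by omega
    have e2 : j + (k + 1) = (j + k) + 1 := by omega
    rw [ih, e1, e2, List.drop_eq_getElem_cons h1, List.drop_eq_getElem_cons h2]
    simp [cext, h3, List.getElem?_eq_getElem h1, List.append_assoc]
  | case2 k acc h =>
    by_cases h1 : i + k < w1.length
    · by_cases h2 : j + k < w2.length
      · have h3 : w1[i + k] ≠ w2[j + k] := by
          intro he
          exact h ⟨h1, h2, by rw [List.getD_eq_getElem w1 ' ' h1, List.getD_eq_getElem w2 ' ' h2, he]⟩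
        rw [List.drop_eq_getElem_cons h1, List.drop_eq_getElem_cons h2]
        simp [cext, h3]
      · rw [show List.drop (j + k) w2 = [] from List.drop_eq_nil_of_le (by omega),
            cext_nil_right]; simp
    · rw [List.drop_eq_nil_of_le (by omega)]; simp [cext]

-- B's DP row is correct, given that nxt describes the previous suffix of w1
theorem lcpRow_getD (c : Char) (as : List Char) :
    ∀ (w2 : List Char) (nxt : List Nat),
    (∀ j, nxt.getD j 0 = (cext as (w2.drop j)).length) →
    ∀ j, (lcpRow c w2 nxt).getD j 0 = (cext (c :: as) (w2.drop j)).length := by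
  intro w2
  induction w2 with
  | nil =>
    intro nxt _ j
    cases j <;> simp [lcpRow, cext_nil_right, List.getD]
  | cons b bs ih =>
    intro nxt hn j
    cases j with
    | zero =>
      have h1 := hn 1
      simp only [List.getD, List.drop_succ_cons, List.drop_zero] at h1
      by_cases h : c = b
      · simp [lcpRow, cext, h, List.getD, h1]
      · simp [lcpRow, cext, h, List.getD]
    | succ j' =>
      have hsh : ∀ j, nxt.tail.getD j 0 = nxt.getD (j + 1) 0 := by
        intro j; cases nxt <;> simp [List.getD]
      have := ih nxt.tail (fun j => by
        rw [hsh j, hn (j + 1)]; simp [List.drop_succ_cons]) j'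
      simpa [lcpRow, List.getD] using this

theorem lcpRows_getD : ∀ (w1 w2 : List Char) (i j : Nat),
    ((lcpRows w1 w2).getD i []).getD j 0 = (cext (w1.drop i) (w2.drop j)).length := by
  intro w1
  induction w1 with
  | nil => intro w2 i j; simp [lcpRows, cext, List.getD]
  | cons a as ih =>
    intro w2 i j
    cases i with
    | zero =>
      have hbase : ∀ j, ((lcpRows as w2).headD (List.replicate (w2.length + 1) 0)).getD j 0
          = (cext as (w2.drop j)).length := by
        intro j
        cases has : as with
        | nil =>
          simp only [lcpRows, List.headD_nil]
          simp [cext, List.getD, List.getElem?_replicate]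
          split <;> simp
        | cons a' as' =>
          have := ih w2 0 j
          rw [has] at this
          simpa [lcpRows, List.getD] using this
      simpa [lcpRows, List.getD] using lcpRow_getD a as w2 _ hbase j
    | succ i' =>
      simpa [lcpRows, List.getD] using ih w2 i' j

-- chars at i,j (with default ' ') differ → the common extension is empty
theorem cext_empty_of_ne (w1 w2 : List Char) (i j : Nat)
    (h : w1.getD i ' ' ≠ w2.getD j ' ') : cext (w1.drop i) (w2.drop j) = [] := by
  have h1 : w1.getD i ' ' = (w1.drop i).headD ' ' := by
    simp [List.getD, ← List.head?_drop]
  have h2 : w2.getD j ' ' = (w2.drop j).headD ' ' := by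
    simp [List.getD, ← List.head?_drop]
  rw [h1, h2] at h
  cases hd1 : w1.drop i with
  | nil => simp [cext]
  | cons a as =>
    cases hd2 : w2.drop j with
    | nil => simp [cext_nil_right]
    | cons b bs =>
      rw [hd1, hd2] at h
      simp at h
      simp [cext, h]

-- a fold whose step fixes b leaves b unchanged
theorem foldl_fixed {α β : Type} (f : β → α → β) (b : β) (l : List α)
    (h : ∀ x, f b x = b) : l.foldl f b = b := by
  induction l with
  | nil => rfl
  | cons x xs ih => simp [List.foldl_cons, h x, ih]

theorem cext_length_le : ∀ xs ys : List Char,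
    (cext xs ys).length ≤ xs.length ∧ (cext xs ys).length ≤ ys.length := by
  intro xs ys
  induction xs generalizing ys with
  | nil => simp [cext]
  | cons a as ih =>
    cases ys with
    | nil => simp [cext]
    | cons b bs =>
      by_cases h : a = b
      · have := ih bs
        simp [cext, h]
        omega
      · simp [cext, h]

-- when no common substring of the pair can be ≥ 3 and longer than best, A's cell never updates
theorem cell_skip (w1 w2 : List Char) (i j : Nat) (best : List Char)
    (h : min w1.length w2.length < 3 ∨ min w1.length w2.length ≤ best.length) :
    (if w1.getD i ' ' = w2.getD j ' ' then
       let substring := extA w1 w2 i j 0 []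
       if 3 ≤ substring.length ∧ best.length < substring.length then substring else best
     else best) = best := by
  by_cases hc : w1.getD i ' ' = w2.getD j ' '
  · have hext := extA_eq w1 w2 i j 0 []
    simp only [Nat.add_zero, List.nil_append] at hext
    have hle := cext_length_le (w1.drop i) (w2.drop j)
    have h1 : (w1.drop i).length ≤ w1.length := by simp
    have h2 : (w2.drop j).length ≤ w2.length := by simp
    simp only [if_pos hc, hext]
    rw [if_neg]
    omega
  · rw [if_neg hc]

-- the two per-cell updates agree
theorem cell_eq (w1 w2 : List Char) (i j : Nat) (best : List Char) :
    (if w1.getD i ' ' = w2.getD j ' ' then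
       let substring := extA w1 w2 i j 0 []
       if 3 ≤ substring.length ∧ best.length < substring.length then substring else best
     else best)
    = (let l := ((lcpRows w1 w2).getD i []).getD j 0
       if 3 ≤ l ∧ best.length < l then (w1.drop i).take l else best) := by
  have hrows := lcpRows_getD w1 w2 i j
  have hext := extA_eq w1 w2 i j 0 []
  simp only [Nat.add_zero, List.nil_append] at hext
  by_cases h : w1.getD i ' ' = w2.getD j ' '
  · simp only [if_pos h, hrows, hext]
    split_ifs with h1
    · exact cext_take _ _
    · rfl
  · simp only [if_neg h, hrows, cext_empty_of_ne w1 w2 i j h]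
    simp

-- ===== VERDICT (by name: the statement is the Claim_ definition above) =====
theorem longest_common_start_spec : Claim_equal_longest_common_start := by
  intro list1 list2 _
  unfold Spec_longest_common_start longest_common_start longest_common_start_alt
  apply congrArg String.ofList
  apply List.foldl_ext; intro b1 s1 _
  apply List.foldl_ext; intro b2 s2 _
  by_cases hskip : min s1.toList.length s2.toList.length < 3 ∨
      min s1.toList.length s2.toList.length ≤ b2.length
  · simp only [if_pos hskip]
    apply foldl_fixed
    intro i
    apply foldl_fixed
    intro j
    exact cell_skip s1.toList s2.toList i j b2 hskip
  · simp only [if_neg hskip]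
    apply List.foldl_ext; intro b3 i _
    apply List.foldl_ext; intro b4 j _
    exact cell_eq s1.toList s2.toList i j b4
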